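-- pv_equiv track=rewrite | github.com/leo-grandmorcel/Codingame | Puzzle facile/Unary/main.py | bin2unaire
-- ===== SOURCE A (Python) =====
-- def bin2unaire(binary):
--     result = ""
--     previous_bit = None
--     for bit in binary:
--         if bit == previous_bit:
--             result += "0"
--         else:
--             if bit == "1":
--                 result += " 0 0"
--             else:
--                 result += " 00 0"
--         previous_bit = bit
--     return result[1:]
-- ===== SOURCE B (Python) =====
-- def bin2unaire(binary):
--     pieces = []
--     s = binary
--     while s:
--         rest = s.lstrip(s[0])
--         run = len(s) - len(rest)
--         pieces.append((" 0 0" if s[0] == "1" else " 00 0") + "0" * (run - 1))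
--         s = rest
--     return "".join(pieces)[1:]
-- ===== Notes on version B (the rewrite author's own statement) =====
-- stated objective: alternative
-- what changed: Replaces the stateful character-by-character loop carrying previous_bit with a loop that peels one maximal run per iteration using str.lstrip(first char), emitting the run's header plus a zero per repeat from the run length, then joining the pieces.
import Mathlib
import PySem

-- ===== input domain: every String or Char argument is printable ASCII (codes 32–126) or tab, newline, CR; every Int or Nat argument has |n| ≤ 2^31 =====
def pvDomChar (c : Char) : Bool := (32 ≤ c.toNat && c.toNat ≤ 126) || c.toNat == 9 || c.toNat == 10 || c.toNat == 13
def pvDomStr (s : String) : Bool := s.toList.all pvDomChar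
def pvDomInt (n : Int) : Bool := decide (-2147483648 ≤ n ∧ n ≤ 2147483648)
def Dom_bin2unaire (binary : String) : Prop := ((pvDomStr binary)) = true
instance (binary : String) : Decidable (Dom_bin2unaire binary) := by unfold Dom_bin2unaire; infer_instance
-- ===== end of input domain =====

-- B replaces A's previous_bit-tracking loop with a loop peeling one maximal run per iteration via lstrip (alternative decomposition); same result proved equal.


-- ===== PORT A =====
-- literal port: fold over the characters carrying (result, previous_bit); return result[1:]
def bin2unaireStep (st : List Char × Option Char) (bit : Char) : List Char × Option Char :=
  if st.2 = some bit then (st.1 ++ ['0'], some bit)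
  else if bit = '1' then (st.1 ++ (" 0 0".toList), some bit)
  else (st.1 ++ (" 00 0".toList), some bit)

def bin2unaire (binary : String) : String :=
  String.ofList (PySem.List.slice (binary.toList.foldl bin2unaireStep ([], none)).1 (some 1) none)

-- ===== PORT B =====
-- the while loop: peel the maximal leading run (s.lstrip(s[0]) = dropWhile), append
-- header + '0'*(run-1) to pieces, continue on the rest
def bin2unaireLoop : List Char → List (List Char) → List (List Char)
  | [], pieces => pieces
  | c :: t, pieces =>
    bin2unaireLoop (t.dropWhile (· == c))
      (pieces ++ [(if c = '1' then " 0 0".toList else " 00 0".toList) ++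
        List.replicate (t.length - (t.dropWhile (· == c)).length) '0'])
termination_by l _ => l.length
decreasing_by
  have h := List.length_dropWhile_le (· == c) t
  simp only [List.length_cons]
  omega

-- "".join(pieces)[1:]
def bin2unaire_alt (binary : String) : String :=
  String.ofList (((bin2unaireLoop binary.toList []).flatten).drop 1)

-- ===== PRECONDITION & SPEC =====
def Spec_bin2unaire (binary : String) (out : String) : Prop := out = bin2unaire_alt binary
instance (binary : String) (out : String) : Decidable (Spec_bin2unaire binary out) := by unfold Spec_bin2unaire; infer_instance

-- ===== CLAIM (what is proved, stated in full; the proofs are below) =====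
def Claim_equal_bin2unaire : Prop := ∀ (binary : String), Dom_bin2unaire binary → Spec_bin2unaire binary (bin2unaire binary)

-- ===== LEMMAS AND PROOFS =====

-- the characters A's loop appends when the previous bit is `prev`
def emitFrom (prev : Option Char) : List Char → List Char
  | [] => []
  | b :: rest =>
    (if prev = some b then ['0']
     else if b = '1' then " 0 0".toList else " 00 0".toList) ++ emitFrom (some b) rest

-- accumulator-free view of B's loop
def bin2unaireEncode : List Char → List Char
  | [] => []
  | c :: t =>
    (if c = '1' then " 0 0".toList else " 00 0".toList) ++
      List.replicate (t.length - (t.dropWhile (· == c)).length) '0' ++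
      bin2unaireEncode (t.dropWhile (· == c))
termination_by l => l.length
decreasing_by
  have h := List.length_dropWhile_le (· == c) t
  simp only [List.length_cons]
  omega

theorem encode_nil : bin2unaireEncode [] = [] := by rw [bin2unaireEncode]

theorem encode_cons (c : Char) (t : List Char) :
    bin2unaireEncode (c :: t) =
      (if c = '1' then " 0 0".toList else " 00 0".toList) ++
        List.replicate (t.length - (t.dropWhile (· == c)).length) '0' ++
        bin2unaireEncode (t.dropWhile (· == c)) := by
  rw [bin2unaireEncode]

theorem loop_flatten (l : List Char) : ∀ (ps : List (List Char)),
    (bin2unaireLoop l ps).flatten = ps.flatten ++ bin2unaireEncode l := by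
  induction l using bin2unaireEncode.induct with
  | case1 => intro ps; rw [bin2unaireLoop, encode_nil]; simp
  | case2 c t ih =>
    intro ps
    rw [bin2unaireLoop, encode_cons, ih]
    simp

theorem foldl_step_eq (l : List Char) : ∀ (acc : List Char) (prev : Option Char),
    (l.foldl bin2unaireStep (acc, prev)).1 = acc ++ emitFrom prev l := by
  induction l with
  | nil => intro acc prev; simp [emitFrom]
  | cons b rest ih =>
    intro acc prev
    simp only [List.foldl_cons, bin2unaireStep, emitFrom]
    by_cases h : prev = some b
    · simp [h, ih]
    · by_cases h1 : b = '1'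
      · subst h1; simp [h, ih]
      · simp [h, h1, ih]

theorem emitFrom_some_eq (t : List Char) : ∀ (c : Char),
    emitFrom (some c) t =
      List.replicate (t.length - (t.dropWhile (· == c)).length) '0' ++
        bin2unaireEncode (t.dropWhile (· == c)) := by
  induction t with
  | nil => intro c; simp [emitFrom, encode_nil]
  | cons b r ih =>
    intro c
    by_cases hb : b = c
    · subst hb
      have hle := List.length_dropWhile_le (· == b) r
      have hrep : (b :: r).length - ((b :: r).dropWhile (· == b)).length
          = (r.length - (r.dropWhile (· == b)).length) + 1 := by
        simp only [List.dropWhile_cons, beq_self_eq_true, if_pos]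
        simp only [List.length_cons]
        omega
      simp only [emitFrom, ih b, hrep, List.replicate_succ]
      simp
    · have hdrop : (b :: r).dropWhile (· == c) = b :: r := by
        simp [hb]
      rw [hdrop]
      have hne : ¬ (some c = some b) := by simpa using Ne.symm hb
      rw [encode_cons b r]
      simp only [emitFrom, if_neg hne, List.length_cons, Nat.sub_self, List.replicate,
        List.nil_append, ih b]
      simp

theorem emitFrom_none (l : List Char) : emitFrom none l = bin2unaireEncode l := by
  cases l with
  | nil => simp [emitFrom, encode_nil]
  | cons c t =>
    rw [encode_cons c t]
    simp only [emitFrom, emitFrom_some_eq t c]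
    by_cases h1 : c = '1' <;> simp [h1]

-- ===== VERDICT (by name: the statement is the Claim_ definition above) =====
theorem bin2unaire_spec : Claim_equal_bin2unaire := by
  intro binary _
  unfold Spec_bin2unaire bin2unaire bin2unaire_alt
  rw [PySem.List.slice_from_one, foldl_step_eq, emitFrom_none, loop_flatten]
  simp [List.drop_one]
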